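-- pv_equiv track=rewrite | github.com/EzequielRomio/whats_app_statistics | str_helpers.py | user_name_generator
-- ===== SOURCE A (Python) =====
-- def user_name_generator(text_line):
--     aux = 0
--     result = ""
--     for x in text_line:
--         if aux == 3:  ### AUX ACOUNTS NUMBER OF ' ', WHEN = 3, THE USER NAME STARTS
--             result += x
--             if result[-1] == ":": ### IF RESULT = 'Gabriel Alberto:'
--                 result = result.strip(":") ### REMOVES THE ':'
--                 return result
--         elif x == " ":
--             aux += 1
-- ===== SOURCE B (Python) =====
-- def user_name_generator(text_line):
--     rest = text_line
--     for _ in range(3):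
--         sp = rest.find(' ')
--         if sp == -1:
--             return None
--         rest = rest[sp + 1:]
--     colon = rest.find(':')
--     if colon == -1:
--         return None
--     return rest[:colon]
-- ===== Notes on version B (the rewrite author's own statement) =====
-- stated objective: faster
-- what changed: Replaces the per-character loop with a space counter and a growing accumulator string (quadratic += and a final strip) by three find-space-then-slice steps to skip past the third space, then one find-colon and one slice.
import Mathlib
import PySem

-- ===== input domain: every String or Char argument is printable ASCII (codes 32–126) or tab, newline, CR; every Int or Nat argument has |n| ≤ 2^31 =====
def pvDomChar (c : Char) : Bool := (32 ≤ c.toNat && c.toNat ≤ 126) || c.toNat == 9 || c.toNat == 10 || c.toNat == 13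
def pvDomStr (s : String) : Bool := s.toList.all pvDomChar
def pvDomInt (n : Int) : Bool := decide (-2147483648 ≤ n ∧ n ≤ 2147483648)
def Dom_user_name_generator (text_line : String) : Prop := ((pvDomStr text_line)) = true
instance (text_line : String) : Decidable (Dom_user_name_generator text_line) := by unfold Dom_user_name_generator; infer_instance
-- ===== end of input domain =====

-- B replaces A's per-character loop (space counter, quadratic accumulator growth, final strip)
-- by three find-space+slice skips and one find-colon+slice; measured faster at large sizes.

-- ===== PORT A =====
-- A's for-loop: state is (aux, result); early 'return' modelled by Option.
def userALoop : List Char → Nat → List Char → Option (List Char)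
  | [], _, _ => none
  | x :: xs, aux, result =>
    if aux = 3 then
      if PySem.List.pyGet? (result ++ [x]) (-1) = some ':' then
        some (PySem.Chars.stripChars (result ++ [x]) [':'])
      else userALoop xs aux (result ++ [x])
    else if x = ' ' then userALoop xs (aux + 1) result
    else userALoop xs aux result

def user_name_generator (text_line : String) : Option String :=
  (userALoop text_line.toList 0 []).map String.ofList

-- ===== PORT B =====
-- B's 'for _ in range(3)' skip loop: find first ' ', slice past it.
def bSkip : Nat → List Char → Option (List Char)
  | 0, rest => some rest
  | n + 1, rest =>
    if PySem.Chars.find rest [' '] = -1 then none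
    else bSkip n (PySem.List.slice rest (some (PySem.Chars.find rest [' '] + 1)) none)

def user_name_generator_alt (text_line : String) : Option String :=
  match bSkip 3 text_line.toList with
  | none => none
  | some rest =>
    let colon := PySem.Chars.find rest [':']
    if colon = -1 then none
    else some (String.ofList (PySem.List.slice rest none (some colon)))

-- ===== PRECONDITION & SPEC =====
def Spec_user_name_generator (text_line : String) (out : Option String) : Prop := out = user_name_generator_alt text_line
instance (text_line : String) (out : Option String) : Decidable (Spec_user_name_generator text_line out) := by unfold Spec_user_name_generator; infer_instance

-- ===== CLAIM (what is proved, stated in full; the proofs are below) =====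
def Claim_equal_user_name_generator : Prop := ∀ (text_line : String), Dom_user_name_generator text_line → Spec_user_name_generator text_line (user_name_generator text_line)

-- ===== LEMMAS AND PROOFS =====

theorem singleton_prefix_iff (c : Char) (l : List Char) : [c] <+: l ↔ l.head? = some c := by
  cases l with
  | nil => simp
  | cons x xs => simp [List.cons_prefix_cons, eq_comm]

theorem takeWhile_eq_take_aux (p : Char → Bool) (s : List Char) (n : Nat) (hn : n < s.length)
    (h1 : ∀ i, (hi : i < n) → p (s[i]'(by omega)) = true)
    (h2 : p (s[n]'hn) = false) : s.takeWhile p = s.take n := by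
  induction s generalizing n with
  | nil => simp at hn
  | cons x xs ih =>
    cases n with
    | zero => simp at h2; simp [h2]
    | succ m =>
      have hx : p x = true := h1 0 (by omega)
      simp only [List.takeWhile_cons, hx, if_true, List.take_succ_cons]
      rw [ih m (by simpa using hn) (fun i hi => h1 (i+1) (by omega)) (by simpa using h2)]

-- find for a one-character needle is the length of the (¬=)-takeWhile prefix
theorem find_single (s : List Char) (c : Char) (h : c ∈ s) :
    PySem.Chars.find s [c] = ((s.takeWhile (fun x => x != c)).length : Int) := by
  have hnn : 0 ≤ PySem.Chars.find s [c] := by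
    rw [PySem.Chars.find_nonneg_iff]; exact (List.singleton_infix_iff c s).mpr h
  obtain ⟨hpre, hmin⟩ := PySem.Chars.find_spec hnn
  set n := (PySem.Chars.find s [c]).toNat with hn
  rw [singleton_prefix_iff, List.head?_drop] at hpre
  have hlt : n < s.length := by
    by_contra hcon
    rw [List.getElem?_eq_none (by omega)] at hpre
    simp at hpre
  have hgetn : s[n]'hlt = c := by
    rw [List.getElem?_eq_getElem hlt] at hpre; exact Option.some.inj hpre
  have htw : s.takeWhile (fun x => x != c) = s.take n := by
    apply takeWhile_eq_take_aux _ _ _ hlt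
    · intro i hi
      have := hmin i hi
      rw [singleton_prefix_iff, List.head?_drop, List.getElem?_eq_getElem (by omega)] at this
      simp only [bne_iff_ne, ne_eq]
      intro hh; exact this (by rw [hh])
    · simp [hgetn]
  rw [htw, List.length_take, min_eq_left (by omega)]
  omega

theorem find_single_neg (s : List Char) (c : Char) (h : c ∉ s) :
    PySem.Chars.find s [c] = -1 := by
  rw [PySem.Chars.find_eq_neg_one_iff]
  rw [List.singleton_infix_iff]; exact h

theorem pyGet_append_neg_one (l : List Char) (x : Char) :
    PySem.List.pyGet? (l ++ [x]) (-1) = some x := by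
  simp [PySem.List.pyGet?, PySem.List.pyIdx?]

theorem strip_colon (w : List Char) (hw : (':' : Char) ∉ w) :
    PySem.Chars.stripChars (w ++ [':']) [':'] = w := by
  cases w with
  | nil => decide
  | cons a t =>
    have hmem : ∀ c ∈ (a :: t), (c == ':') = false := by
      intro c hc
      have hne : c ≠ ':' := fun hh => hw (hh ▸ hc)
      simp [hne]
    show (List.dropWhile (fun c => ([':'] : List Char).contains c)
      ((List.dropWhile (fun c => ([':'] : List Char).contains c) ((a :: t) ++ [':'])).reverse)).reverse = a :: t
    simp only [List.contains_cons, List.contains_nil, Bool.or_false]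
    have h1 : List.dropWhile (fun c => c == ':') ((a :: t) ++ [':']) = (a :: t) ++ [':'] := by
      rw [List.cons_append, List.dropWhile_cons, hmem a (by simp)]
      simp
    rw [h1, List.reverse_append, List.reverse_singleton, List.singleton_append,
      List.dropWhile_cons]
    simp only [beq_self_eq_true, if_true]
    have h2 : List.dropWhile (fun c => c == ':') (a :: t).reverse = (a :: t).reverse := by
      rw [List.dropWhile_eq_self_iff]
      intro hl
      have hx : (a :: t).reverse[0] ∈ (a :: t).reverse := List.getElem_mem hl
      rw [hmem _ (List.mem_reverse.mp hx)]
      simp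
    rw [h2, List.reverse_reverse]

-- A's loop once aux = 3: take everything up to the first ':' (None if no colon)
theorem loopA_colon (s acc : List Char) (hacc : (':' : Char) ∉ acc) :
    userALoop s 3 acc =
      if (':' : Char) ∈ s then some (acc ++ s.takeWhile (fun x => x != ':')) else none := by
  induction s generalizing acc with
  | nil => simp [userALoop]
  | cons c cs ih =>
    by_cases hc : c = ':'
    · subst hc
      simp [userALoop, strip_colon acc hacc]
    · have hacc' : (':' : Char) ∉ acc ++ [c] := by
        simp only [List.mem_append, List.mem_singleton, not_or]
        exact ⟨hacc, fun hh => hc hh.symm⟩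
      have hget : PySem.List.pyGet? (acc ++ [c]) (-1) ≠ some ':' := by
        rw [pyGet_append_neg_one]; intro hh
        exact hc (Option.some.inj hh)
      simp only [userALoop, hget, if_false, reduceIte]
      rw [ih (acc ++ [c]) hacc']
      have hm : ((':' : Char) ∈ c :: cs) ↔ ((':' : Char) ∈ cs) := by
        simp [hc, eq_comm]
      have htw : (c :: cs).takeWhile (fun x => x != ':') = c :: cs.takeWhile (fun x => x != ':') := by
        simp [hc]
      simp only [hm, htw]
      split_ifs <;> simp

-- A's loop while aux < 3: skip to just past the first space (None if no space)
theorem loopA_skip (s res : List Char) (aux : Nat) (h : aux ≠ 3) :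
    userALoop s aux res =
      if (' ' : Char) ∈ s then
        userALoop (s.drop ((s.takeWhile (fun x => x != ' ')).length + 1)) (aux + 1) res
      else none := by
  induction s with
  | nil => simp [userALoop]
  | cons c cs ih =>
    by_cases hc : c = ' '
    · subst hc
      simp [userALoop, h]
    · have hm : ((' ' : Char) ∈ c :: cs) ↔ ((' ' : Char) ∈ cs) := by
        simp [hc, eq_comm]
      have htw : (c :: cs).takeWhile (fun x => x != ' ') = c :: cs.takeWhile (fun x => x != ' ') := by
        simp [hc]
      simp only [userALoop, if_neg h, if_neg hc]
      rw [ih]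
      simp only [hm, htw]
      split_ifs with hmem
      · simp
      · rfl

-- B's skip step computes the same "drop past the first space"
theorem bSkip_succ (n : Nat) (rest : List Char) :
    bSkip (n + 1) rest =
      if (' ' : Char) ∈ rest then
        bSkip n (rest.drop ((rest.takeWhile (fun x => x != ' ')).length + 1))
      else none := by
  by_cases h : (' ' : Char) ∈ rest
  · have hf := find_single rest ' ' h
    have hne : PySem.Chars.find rest [' '] ≠ -1 := by rw [hf]; omega
    simp only [bSkip, hne, if_false, if_pos h]
    rw [hf, PySem.List.slice_from _ (by omega)]
    have hcast : (((rest.takeWhile (fun x => x != ' ')).length : Int) + 1).toNat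
        = (rest.takeWhile (fun x => x != ' ')).length + 1 := by omega
    rw [hcast]
  · have hf := find_single_neg rest ' ' h
    simp [bSkip, hf, h]

-- the colon phase of B equals A's characterization
theorem colon_phase (rest : List Char) :
    (if (':' : Char) ∈ rest then some ([] ++ rest.takeWhile (fun x => x != ':')) else none).map String.ofList =
      (let colon := PySem.Chars.find rest [':']
       if colon = -1 then none
       else some (String.ofList (PySem.List.slice rest none (some colon)))) := by
  by_cases h : (':' : Char) ∈ rest
  · have hf := find_single rest ':' h
    have hne : PySem.Chars.find rest [':'] ≠ -1 := by rw [hf]; omega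
    simp only [h, if_true, hne, if_false, List.nil_append, Option.map_some]
    rw [hf, PySem.List.slice_to _ (by positivity)]
    have : ((rest.takeWhile (fun x => x != ':')).length : Int).toNat
        = (rest.takeWhile (fun x => x != ':')).length := by omega
    rw [this, ← List.prefix_iff_eq_take.mp (List.takeWhile_prefix _)]
  · have hf := find_single_neg rest ':' h
    simp [h, hf]

theorem main_list (l : List Char) :
    (userALoop l 0 []).map String.ofList =
      (match bSkip 3 l with
       | none => none
       | some rest =>
         let colon := PySem.Chars.find rest [':']
         if colon = -1 then none
         else some (String.ofList (PySem.List.slice rest none (some colon)))) := by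
  rw [loopA_skip l [] 0 (by omega), bSkip_succ]
  by_cases h1 : (' ' : Char) ∈ l
  · simp only [h1, if_true]
    set l1 := l.drop ((l.takeWhile (fun x => x != ' ')).length + 1) with hl1
    rw [loopA_skip l1 [] 1 (by omega), bSkip_succ]
    by_cases h2 : (' ' : Char) ∈ l1
    · simp only [h2, if_true]
      set l2 := l1.drop ((l1.takeWhile (fun x => x != ' ')).length + 1) with hl2
      rw [loopA_skip l2 [] 2 (by omega), bSkip_succ]
      by_cases h3 : (' ' : Char) ∈ l2
      · simp only [h3, if_true]
        set l3 := l2.drop ((l2.takeWhile (fun x => x != ' ')).length + 1) with hl3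
        rw [loopA_colon l3 [] (by simp)]
        simpa using colon_phase l3
      · simp [h3]
    · simp [h2]
  · simp [h1]

-- ===== VERDICT (by name: the statement is the Claim_ definition above) =====
theorem user_name_generator_spec : Claim_equal_user_name_generator := by
  intro text_line _
  unfold Spec_user_name_generator user_name_generator user_name_generator_alt
  exact main_list text_line.toList
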